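-- pv_equiv track=rewrite | github.com/KonradJankowski/python-poczatek | funkcje_II.py | find_best_grade
-- ===== SOURCE A (Python) =====
-- def find_best_grade(grades_by_subject):
--     best_subject = None
--     best_grade = 0
--     for subject, grades in grades_by_subject.items():
--         best_grade_from_subject = max(grades)
--         if best_grade_from_subject > best_grade:
--             best_grade = best_grade_from_subject
--             best_subject = subject
--     return best_grade, best_subject
-- ===== SOURCE B (Python) =====
-- def find_best_grade(grades_by_subject):
--     ranked = sorted(((max(grades), subject) for subject, grades in grades_by_subject.items()),
--                     key=lambda p: p[0], reverse=True)
--     if ranked and ranked[0][0] > 0: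
--         return ranked[0]
--     return 0, None
-- ===== Notes on version B (the rewrite author's own statement) =====
-- stated objective: alternative
-- what changed: Replaces A's single-pass best-so-far accumulator with a sort-then-pick algorithm: stable-sort the (max(grades), subject) candidates by grade descending and return the head pair if its grade is positive, else (0, None); sort stability reproduces A's first-wins tie-breaking and the strict > 0 head check reproduces A's (0, None) default.
import Mathlib
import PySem

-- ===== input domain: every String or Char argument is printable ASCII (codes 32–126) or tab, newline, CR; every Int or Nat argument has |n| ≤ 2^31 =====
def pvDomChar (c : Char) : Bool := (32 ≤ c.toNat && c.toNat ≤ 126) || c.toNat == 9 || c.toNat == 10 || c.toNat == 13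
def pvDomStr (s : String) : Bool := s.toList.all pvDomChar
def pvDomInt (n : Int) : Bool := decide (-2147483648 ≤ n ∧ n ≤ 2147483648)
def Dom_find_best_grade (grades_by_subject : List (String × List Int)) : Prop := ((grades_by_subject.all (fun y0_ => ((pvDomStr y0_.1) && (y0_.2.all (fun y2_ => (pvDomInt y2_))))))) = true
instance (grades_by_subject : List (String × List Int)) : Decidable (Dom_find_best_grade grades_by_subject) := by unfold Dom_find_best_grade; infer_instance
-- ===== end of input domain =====

-- B replaces A's best-so-far accumulator loop with sort-then-pick: stable-sort the
-- (max(grades), subject) candidates by grade descending and take the head if positive (alternative).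

-- ===== PORT A =====
def find_best_grade (grades_by_subject : List (String × List Int)) : Int × Option String :=
  grades_by_subject.foldl
    (fun st p =>
      -- max(grades): Python raises ValueError on []; Pre_ excludes that, so getD 0 is unreachable
      let best_grade_from_subject := (PySem.List.max? p.2 (fun x => x)).getD 0
      if best_grade_from_subject > st.1 then (best_grade_from_subject, some p.1) else st)
    ((0 : Int), (none : Option String))

-- ===== PORT B =====
def find_best_grade_alt (grades_by_subject : List (String × List Int)) : Int × Option String :=
  let ranked := PySem.List.sorted
    (grades_by_subject.map (fun p => ((PySem.List.max? p.2 (fun x => x)).getD 0, p.1)))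
    (fun q => q.1) true
  match ranked with
  | [] => (0, none)
  | q :: _ => if q.1 > 0 then (q.1, some q.2) else (0, none)

-- ===== PRECONDITION & SPEC =====
-- Pre_ excludes inputs containing an empty grade list, on which Python A raises ValueError (max of empty sequence).
def Pre_find_best_grade (grades_by_subject : List (String × List Int)) : Prop :=
  ∀ p ∈ grades_by_subject, p.2 ≠ []
instance (grades_by_subject : List (String × List Int)) : Decidable (Pre_find_best_grade grades_by_subject) := by unfold Pre_find_best_grade; infer_instance
def pvWitness_find_best_grade : (List (String × List Int)) := [("math", [4, 5]), ("art", [3])]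
def Spec_find_best_grade (grades_by_subject : List (String × List Int)) (out : Int × Option String) : Prop := out = find_best_grade_alt grades_by_subject
instance (grades_by_subject : List (String × List Int)) (out : Int × Option String) : Decidable (Spec_find_best_grade grades_by_subject out) := by unfold Spec_find_best_grade; infer_instance

-- ===== CLAIM (what is proved, stated in full; the proofs are below) =====
def Claim_equal_find_best_grade : Prop := ∀ (grades_by_subject : List (String × List Int)), Dom_find_best_grade grades_by_subject → Pre_find_best_grade grades_by_subject → Spec_find_best_grade grades_by_subject (find_best_grade grades_by_subject)

-- ===== LEMMAS AND PROOFS =====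

-- first-maximum combining step (keeps the earlier element on ties)
def pvStep (b c : Int × String) : Int × String := if b.1 < c.1 then c else b

-- A's accumulator step
def pvF (st : Int × Option String) (c : Int × String) : Int × Option String :=
  if c.1 > st.1 then (c.1, some c.2) else st

theorem head?_insertBy (x : Int × String) (acc : List (Int × String)) :
    (PySem.List.insertBy (fun a b => decide ((b.1 : Int) < a.1)) x acc).head? =
      some (match acc.head? with | none => x | some h => pvStep h x) := by
  cases acc with
  | nil => rfl
  | cons h t =>
    simp only [PySem.List.insertBy, pvStep, List.head?_cons]
    split_ifs with hlt <;> simp_all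

theorem head?_foldl_insertBy (rest : List (Int × String)) :
    ∀ (acc : List (Int × String)) (b : Int × String), acc.head? = some b →
    (rest.foldl (fun acc x => PySem.List.insertBy (fun a b => decide ((b.1 : Int) < a.1)) x acc) acc).head?
      = some (rest.foldl pvStep b) := by
  induction rest with
  | nil => intro acc b hb; simpa using hb
  | cons c t ih =>
    intro acc b hb
    simp only [List.foldl_cons]
    refine ih _ (pvStep b c) ?_
    rw [head?_insertBy, hb]

theorem head?_sorted_rev (ms : List (Int × String)) :
    (PySem.List.sorted ms (fun q => q.1) true).head? =
      match ms with | [] => none | c :: rest => some (rest.foldl pvStep c) := by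
  rw [PySem.List.sorted_rev_eq_foldl_insertBy]
  cases ms with
  | nil => rfl
  | cons c rest =>
    simp only [List.foldl_cons]
    exact head?_foldl_insertBy rest [c] c rfl

theorem seed_le_foldl_pvStep (rest : List (Int × String)) :
    ∀ (c : Int × String), c.1 ≤ (rest.foldl pvStep c).1 := by
  induction rest with
  | nil => intro c; exact le_refl _
  | cons d t ih =>
    intro c
    refine le_trans ?_ (ih (pvStep c d))
    unfold pvStep; split_ifs with h <;> omega

theorem foldl_pvF_some (ms : List (Int × String)) :
    ∀ (h : Int × String),
      ms.foldl pvF (h.1, some h.2) = ((ms.foldl pvStep h).1, some (ms.foldl pvStep h).2) := by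
  induction ms with
  | nil => intro h; rfl
  | cons c t ih =>
    intro h
    simp only [List.foldl_cons]
    by_cases hlt : h.1 < c.1
    · have : pvF (h.1, some h.2) c = (c.1, some c.2) := by
        unfold pvF; simp [gt_iff_lt, hlt]
      rw [this, ih c]
      unfold pvStep; simp [hlt]
    · have : pvF (h.1, some h.2) c = (h.1, some h.2) := by
        unfold pvF; simp [gt_iff_lt, hlt]
      rw [this, ih h]
      unfold pvStep; simp [hlt]

theorem foldl_pvF_zero (ms : List (Int × String)) :
    ∀ (c : Int × String), c.1 ≤ 0 →
      ms.foldl pvF ((0 : Int), (none : Option String)) =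
        (if (ms.foldl pvStep c).1 > 0
          then ((ms.foldl pvStep c).1, some (ms.foldl pvStep c).2)
          else ((0 : Int), (none : Option String))) := by
  induction ms with
  | nil =>
    intro c hc
    simp only [List.foldl_nil]
    rw [if_neg (by omega)]
  | cons d t ih =>
    intro c hc
    simp only [List.foldl_cons]
    by_cases hd : d.1 > 0
    · have h1 : pvF ((0 : Int), (none : Option String)) d = (d.1, some d.2) := by
        unfold pvF; simp [hd]
      have h2 : pvStep c d = d := by unfold pvStep; simp; omega
      rw [h1, h2, foldl_pvF_some t d]
      have := seed_le_foldl_pvStep t d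
      rw [if_pos (by omega)]
    · have h1 : pvF ((0 : Int), (none : Option String)) d = ((0 : Int), (none : Option String)) := by
        unfold pvF; simp [hd]
      have h2 : (pvStep c d).1 ≤ 0 := by unfold pvStep; split_ifs <;> omega
      rw [h1, ih (pvStep c d) h2]

theorem find_best_grade_eq (l : List (String × List Int)) :
    find_best_grade l = find_best_grade_alt l := by
  unfold find_best_grade find_best_grade_alt
  rw [show (l.foldl
        (fun st p =>
          let best_grade_from_subject := (PySem.List.max? p.2 (fun x => x)).getD 0
          if best_grade_from_subject > st.1 then (best_grade_from_subject, some p.1) else st)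
        ((0 : Int), (none : Option String))) =
      ((l.map (fun p => ((PySem.List.max? p.2 (fun x => x)).getD 0, p.1))).foldl pvF
        ((0 : Int), (none : Option String))) by
    rw [List.foldl_map]; rfl]
  have hh := head?_sorted_rev (l.map (fun p => ((PySem.List.max? p.2 (fun x => x)).getD 0, p.1)))
  cases hms : l.map (fun p => ((PySem.List.max? p.2 (fun x => x)).getD 0, p.1)) with
  | nil =>
    rw [hms] at hh
    simp only [List.foldl_nil]
    cases hs : PySem.List.sorted ([] : List (Int × String)) (fun q => q.1) true with
    | nil => rfl
    | cons q t => rw [hs] at hh; simp at hh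
  | cons c rest =>
    rw [hms] at hh
    simp only at hh
    cases hs : PySem.List.sorted (c :: rest) (fun q => q.1) true with
    | nil => rw [hs] at hh; simp at hh
    | cons q t =>
      rw [hs] at hh
      simp only [List.head?_cons, Option.some.injEq] at hh
      subst hh
      -- LHS: fold over c :: rest from (0, none)
      simp only [List.foldl_cons]
      by_cases hc : c.1 > 0
      · have h1 : pvF ((0 : Int), (none : Option String)) c = (c.1, some c.2) := by
          unfold pvF; simp [hc]
        rw [h1, foldl_pvF_some rest c]
        have := seed_le_foldl_pvStep rest c
        rw [if_pos (by omega)]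
      · have h1 : pvF ((0 : Int), (none : Option String)) c = ((0 : Int), (none : Option String)) := by
          unfold pvF; simp [hc]
        rw [h1, foldl_pvF_zero rest c (by omega)]

-- ===== VERDICT (by name: the statement is the Claim_ definition above) =====
theorem find_best_grade_spec : Claim_equal_find_best_grade := by
  intro l _ _
  exact find_best_grade_eq l
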